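-- pv_equiv track=rewrite | github.com/mrveiss/AutoBot-AI | autobot-backend/security_layer.py | _check_wildcard_permissions
-- ===== SOURCE A (Python) =====
-- from typing import Any, Dict, List, Optional
--
-- def _check_wildcard_permissions(
--     action_type: str, permissions: List[str]
-- ) -> bool:
--     """
--     Check if action matches any wildcard permissions in the list.
--
--     Wildcard permissions end with '.*' and match any action with the
--     same prefix. Issue #620.
--
--     Args:
--         action_type: The action to check.
--         permissions: List of permissions to check against.
--
--     Returns:
--         True if action matches a wildcard permission, False otherwise.
--     """
--     for permission in permissions:
--         if permission.endswith(".*"):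
--             permission_prefix = permission[:-1]  # Remove the '*'
--             if action_type.startswith(permission_prefix):
--                 return True
--     return False
-- ===== SOURCE B (Python) =====
-- from typing import List
--
--
-- def _check_wildcard_permissions(action_type: str, permissions: List[str]) -> bool:
--     """Prefix-set formulation: collect the wildcard prefixes once, then probe
--     action_type's prefix at each length that occurs in the set."""
--     prefixes = {p[:-1] for p in permissions if p.endswith(".*")}
--     lengths = {len(q) for q in prefixes}
--     for n in lengths:
--         if action_type[:n] in prefixes:
--             return True
--     return False
-- ===== Notes on version B (the rewrite author's own statement) =====
-- stated objective: alternative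
-- what changed: Instead of scanning permissions and testing each wildcard with startswith, B builds the set of wildcard prefixes once and probes action_type's prefix at each distinct prefix length for membership in that set, reversing the matching direction.
import Mathlib
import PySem

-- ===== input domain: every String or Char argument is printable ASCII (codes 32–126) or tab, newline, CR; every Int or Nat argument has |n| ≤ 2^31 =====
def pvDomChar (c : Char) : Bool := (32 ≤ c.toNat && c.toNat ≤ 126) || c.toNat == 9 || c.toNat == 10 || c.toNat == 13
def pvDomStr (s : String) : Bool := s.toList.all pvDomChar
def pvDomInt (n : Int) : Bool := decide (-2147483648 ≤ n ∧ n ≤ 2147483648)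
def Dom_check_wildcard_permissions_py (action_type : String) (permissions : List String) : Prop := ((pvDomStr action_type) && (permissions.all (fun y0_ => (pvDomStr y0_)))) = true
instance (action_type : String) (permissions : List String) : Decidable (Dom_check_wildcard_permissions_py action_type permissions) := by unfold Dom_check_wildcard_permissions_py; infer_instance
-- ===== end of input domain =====

-- B replaces A's scan of the permission list (startswith per wildcard) by a prefix set probed
-- with every prefix of action_type — a different matching direction, similar cost (objective: alternative).

-- ===== PORT A =====
-- the 'for permission in permissions: … return True' loop, as structural recursion
def pvLoopA (action_type : String) : List String → Bool
  | [] => false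
  | permission :: rest =>
    if PySem.Str.endswith permission ".*" then
      let permission_prefix := PySem.Str.slice permission none (some (-1))
      if PySem.Str.startswith action_type permission_prefix then true
      else pvLoopA action_type rest
    else pvLoopA action_type rest

def check_wildcard_permissions_py (action_type : String) (permissions : List String) : Bool :=
  pvLoopA action_type permissions

-- ===== PORT B =====
-- prefixes = {p[:-1] for p in permissions if p.endswith(".*")}
def pvPrefixes (permissions : List String) : PySem.Set String :=
  PySem.Set.ofList ((permissions.filter (fun p => PySem.Str.endswith p ".*")).map
    (fun p => PySem.Str.slice p none (some (-1))))

-- lengths = {len(q) for q in prefixes}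
def pvLengths (prefixes : PySem.Set String) : PySem.Set Int :=
  PySem.Set.ofList (prefixes.map PySem.Str.len)

-- the 'for n in lengths: … return True' loop; iterating the Set is safe here because the
-- returned Bool (does ANY length match) does not depend on the iteration order
def pvLoopB (action_type : String) (prefixes : PySem.Set String) : List Int → Bool
  | [] => false
  | n :: rest =>
    if PySem.Set.contains prefixes (PySem.Str.slice action_type none (some n)) then true
    else pvLoopB action_type prefixes rest

def check_wildcard_permissions_py_alt (action_type : String) (permissions : List String) : Bool :=
  pvLoopB action_type (pvPrefixes permissions) (pvLengths (pvPrefixes permissions))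

-- ===== PRECONDITION & SPEC =====
def Spec_check_wildcard_permissions_py (action_type : String) (permissions : List String) (out : Bool) : Prop := out = check_wildcard_permissions_py_alt action_type permissions
instance (action_type : String) (permissions : List String) (out : Bool) : Decidable (Spec_check_wildcard_permissions_py action_type permissions out) := by unfold Spec_check_wildcard_permissions_py; infer_instance

-- ===== CLAIM (what is proved, stated in full; the proofs are below) =====
def Claim_equal_check_wildcard_permissions_py : Prop := ∀ (action_type : String) (permissions : List String), Dom_check_wildcard_permissions_py action_type permissions → Spec_check_wildcard_permissions_py action_type permissions (check_wildcard_permissions_py action_type permissions)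

-- ===== LEMMAS AND PROOFS =====

theorem pvLoopA_eq_any (a : String) (ps : List String) :
    pvLoopA a ps = ps.any (fun p => PySem.Str.endswith p ".*" &&
      PySem.Str.startswith a (PySem.Str.slice p none (some (-1)))) := by
  induction ps with
  | nil => rfl
  | cons p rest ih =>
    simp only [pvLoopA, List.any_cons]
    split_ifs with h1 h2
    · rw [h1, h2, Bool.true_and, Bool.true_or]
    · rw [Bool.not_eq_true] at h2
      rw [h1, h2, Bool.and_false, Bool.false_or, ih]
    · rw [Bool.not_eq_true] at h1
      rw [h1, Bool.false_and, Bool.false_or, ih]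

theorem pvLoopB_eq_any (a : String) (pre : PySem.Set String) (l : List Int) :
    pvLoopB a pre l = l.any (fun i =>
      PySem.Set.contains pre (PySem.Str.slice a none (some i))) := by
  induction l with
  | nil => rfl
  | cons i rest ih =>
    simp only [pvLoopB, List.any_cons]
    split_ifs with h
    · rw [h, Bool.true_or]
    · rw [Bool.not_eq_true] at h
      rw [h, Bool.false_or, ih]

-- membership in the built prefix set, read back as a statement about permissions
theorem pvContains_prefixes_iff (ps : List String) (q : String) :
    PySem.Set.contains (pvPrefixes ps) q = true ↔
    ∃ p ∈ ps, PySem.Str.endswith p ".*" = true ∧ PySem.Str.slice p none (some (-1)) = q := by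
  unfold pvPrefixes
  rw [show ∀ s : PySem.Set String, PySem.Set.contains s q = List.elem q s from fun _ => rfl,
    List.elem_iff, PySem.Set.mem_ofList]
  simp only [List.mem_map, List.mem_filter]
  constructor
  · rintro ⟨p, ⟨hp, hend⟩, rfl⟩
    exact ⟨p, hp, hend, rfl⟩
  · rintro ⟨p, hp, hend, rfl⟩
    exact ⟨p, ⟨hp, hend⟩, rfl⟩

-- Str.slice s [:n] takes the first n characters (natural bound); exact unfolding of the PySem slice
theorem pvSlice_to_natCast_toList (s : String) (n : Nat) :
    (PySem.Str.slice s none (some (n : Int))).toList = s.toList.take n := by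
  simp [PySem.Str.slice]

set_option maxHeartbeats 1600000 in
theorem pv_main (a : String) (ps : List String) :
    check_wildcard_permissions_py a ps = check_wildcard_permissions_py_alt a ps := by
  rw [Bool.eq_iff_iff, check_wildcard_permissions_py, check_wildcard_permissions_py_alt,
    pvLoopA_eq_any, pvLoopB_eq_any]
  simp only [List.any_eq_true, Bool.and_eq_true]
  constructor
  · rintro ⟨p, hp, hend, hstart⟩
    have hpre : (PySem.Str.slice p none (some (-1))).toList <+: a.toList := by
      rw [← PySem.Chars.startswith_iff]
      simpa using hstart
    have hqmem : PySem.Str.slice p none (some (-1)) ∈ pvPrefixes ps := by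
      rw [pvPrefixes, PySem.Set.mem_ofList]
      exact List.mem_map_of_mem (List.mem_filter.mpr ⟨hp, hend⟩)
    refine ⟨PySem.Str.len (PySem.Str.slice p none (some (-1))), ?_, ?_⟩
    · rw [pvLengths, PySem.Set.mem_ofList]
      exact List.mem_map_of_mem hqmem
    · rw [pvContains_prefixes_iff]
      refine ⟨p, hp, hend, ?_⟩
      rw [PySem.Str.len_eq, ← String.toList_inj, pvSlice_to_natCast_toList]
      exact List.prefix_iff_eq_take.mp hpre
  · rintro ⟨n, hn, hcont⟩
    rw [pvContains_prefixes_iff] at hcont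
    obtain ⟨p, hp, hend, hq⟩ := hcont
    rw [pvLengths, PySem.Set.mem_ofList] at hn
    obtain ⟨q₀, _, rfl⟩ := List.mem_map.mp hn
    have hpre : (PySem.Str.slice p none (some (-1))).toList <+: a.toList := by
      rw [hq, PySem.Str.len_eq, pvSlice_to_natCast_toList]
      exact List.take_prefix _ _
    refine ⟨p, hp, hend, ?_⟩
    simpa using (PySem.Chars.startswith_iff _ _).mpr hpre
-- ===== VERDICT (by name: the statement is the Claim_ definition above) =====
theorem check_wildcard_permissions_py_spec : Claim_equal_check_wildcard_permissions_py := by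
  intro a ps _
  unfold Spec_check_wildcard_permissions_py
  exact pv_main a ps
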